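-- pv_equiv track=rewrite | github.com/yf1024871763/TriCIM | src/TileAllocator.py | _divisors_in_range
-- ===== SOURCE A (Python) =====
-- import math
--
-- def _divisors_in_range(n, lo, hi):
--     if n is None or n <= 0:
--         return []
--     result = set()
--     root = int(math.sqrt(n))
--     for d in range(1, root + 1):
--         if n % d != 0:
--             continue
--         q = n // d
--         if lo <= d <= hi:
--             result.add(d)
--         if lo <= q <= hi:
--             result.add(q)
--     return sorted(result)
-- ===== SOURCE B (Python) =====
-- def _divisors_in_range(n, lo, hi):
--     if n is None or n <= 0:
--         return []
--     # factor n into prime powers, building the divisor list multiplicatively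
--     divs = [1]
--     m = n
--     p = 2
--     while p * p <= m:
--         if m % p == 0:
--             e = 0
--             while m % p == 0:
--                 m //= p
--                 e += 1
--             divs = [d * p ** k for d in divs for k in range(e + 1)]
--         p += 1
--     if m > 1:
--         divs = [d * q for d in divs for q in (1, m)]
--     return sorted(d for d in divs if lo <= d <= hi)
-- ===== Notes on version B (the rewrite author's own statement) =====
-- stated objective: alternative
-- what changed: Instead of pairing each trial divisor d <= sqrt(n) with its cofactor n//d in a dedup set, B factors n into prime powers and builds the complete divisor list multiplicatively (cross-product per prime power), then filters [lo,hi] and sorts; no set is needed since the generated divisors are distinct.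
import Mathlib
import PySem

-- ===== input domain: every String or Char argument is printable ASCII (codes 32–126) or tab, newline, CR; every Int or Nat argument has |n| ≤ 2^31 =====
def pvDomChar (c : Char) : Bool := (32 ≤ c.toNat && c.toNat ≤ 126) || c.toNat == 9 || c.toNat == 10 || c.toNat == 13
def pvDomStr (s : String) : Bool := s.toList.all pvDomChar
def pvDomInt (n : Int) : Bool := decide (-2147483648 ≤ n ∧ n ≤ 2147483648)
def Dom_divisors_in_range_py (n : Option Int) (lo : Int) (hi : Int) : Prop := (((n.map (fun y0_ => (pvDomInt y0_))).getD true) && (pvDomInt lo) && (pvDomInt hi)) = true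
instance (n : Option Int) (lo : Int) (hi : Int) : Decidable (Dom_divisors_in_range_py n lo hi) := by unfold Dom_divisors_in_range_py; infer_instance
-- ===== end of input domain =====

-- B replaces the sqrt-pairing + dedup set of A by prime factorization: it factors n into
-- prime powers, builds all divisors multiplicatively, then filters [lo,hi] and sorts
-- (alternative algorithm, similar cost; no speed claim).


-- ===== PORT A =====
def divisors_in_range_py (n? : Option Int) (lo : Int) (hi : Int) : List Int :=
  match n? with
  | none => []
  | some n =>
    if n ≤ 0 then []
    else
      -- int(math.sqrt(n)) ported as the integer square root: exact for 0 < n ≤ 2^31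
      -- (the double sqrt is correctly rounded there, so truncation agrees with Nat.sqrt)
      let root : Int := (Nat.sqrt n.toNat : Int)
      let result : PySem.Set Int :=
        (PySem.List.pyRange 1 (root + 1)).foldl
          (fun result d =>
            if PySem.Int.mod n d ≠ 0 then result
            else
              let q := PySem.Int.floordiv n d
              let result := if lo ≤ d ∧ d ≤ hi then result.add d else result
              if lo ≤ q ∧ q ≤ hi then result.add q else result)
          PySem.Set.empty
      PySem.List.sorted result (fun x => x)

-- ===== PORT B =====
-- inner 'while m % p == 0: m //= p; e += 1' loop of Source B, with structural fuel
-- (fuel m.toNat is enough since m shrinks each pass; the 2 ≤ p ∧ 0 < m conjuncts only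
--  make the guard total — they hold at every call site)
def pvFactorOutGo : Nat → Int → Int → Int → Int × Int
  | 0, _, m, e => (m, e)
  | Nat.succ f, p, m, e =>
    if 2 ≤ p ∧ 0 < m ∧ PySem.Int.mod m p = 0 then
      pvFactorOutGo f p (PySem.Int.floordiv m p) (e + 1)
    else (m, e)

def pvFactorOut (p m e : Int) : Int × Int := pvFactorOutGo m.toNat p m e

-- outer 'while p * p <= m' loop of Source B, with structural fuel ((m-p).toNat + 1 is enough
-- since p grows and m never grows); returns the final (m, divs)
def pvLoopGo : Nat → Int → Int → List Int → Int × List Int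
  | 0, _, m, divs => (m, divs)
  | Nat.succ f, p, m, divs =>
    if p * p ≤ m ∧ 2 ≤ p then
      if PySem.Int.mod m p = 0 then
        let r := pvFactorOut p m 0
        pvLoopGo f (p + 1) r.1
          (divs.flatMap (fun d => (PySem.List.pyRange 0 (r.2 + 1)).map (fun k => d * p ^ k.toNat)))
      else pvLoopGo f (p + 1) m divs
    else (m, divs)

def pvLoop (p m : Int) (divs : List Int) : Int × List Int :=
  pvLoopGo ((m - p).toNat + 1) p m divs

def divisors_in_range_py_alt (n? : Option Int) (lo : Int) (hi : Int) : List Int :=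
  match n? with
  | none => []
  | some n =>
    if n ≤ 0 then []
    else
      let r := pvLoop 2 n [1]
      let divs := if 1 < r.1 then r.2.flatMap (fun d => [1, r.1].map (fun q => d * q)) else r.2
      PySem.List.sorted (divs.filter (fun d => decide (lo ≤ d ∧ d ≤ hi))) (fun x => x)

-- ===== PRECONDITION & SPEC =====
def Spec_divisors_in_range_py (n : Option Int) (lo : Int) (hi : Int) (out : List Int) : Prop := out = divisors_in_range_py_alt n lo hi
instance (n : Option Int) (lo : Int) (hi : Int) (out : List Int) : Decidable (Spec_divisors_in_range_py n lo hi out) := by unfold Spec_divisors_in_range_py; infer_instance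

-- ===== CLAIM (what is proved, stated in full; the proofs are below) =====
def Claim_equal_divisors_in_range_py : Prop := ∀ (n : Option Int) (lo : Int) (hi : Int), Dom_divisors_in_range_py n lo hi → Spec_divisors_in_range_py n lo hi (divisors_in_range_py n lo hi)

-- ===== LEMMAS AND PROOFS =====

-- ---- A-side characterisation (membership of the foldl-built set) ----
def pvRoot (n : Int) : Int := (Nat.sqrt n.toNat : Int)

def pvStep (n lo hi : Int) (s : PySem.Set Int) (d : Int) : PySem.Set Int :=
  if PySem.Int.mod n d ≠ 0 then s
  else
    let q := PySem.Int.floordiv n d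
    let s := if lo ≤ d ∧ d ≤ hi then s.add d else s
    if lo ≤ q ∧ q ≤ hi then s.add q else s

-- x is a divisor of n lying in [lo,hi]
def pvP (n lo hi x : Int) : Prop := x ∣ n ∧ 1 ≤ x ∧ lo ≤ x ∧ x ≤ hi

theorem pv_root_facts (n : Int) (hn : 0 < n) :
    pvRoot n * pvRoot n ≤ n ∧ n < (pvRoot n + 1) * (pvRoot n + 1) := by
  have h1 := Nat.sqrt_le' n.toNat
  have h2 := Nat.lt_succ_sqrt' n.toNat
  have hcast : ((n.toNat : Int)) = n := Int.toNat_of_nonneg hn.le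
  unfold pvRoot
  constructor
  · have := (Nat.cast_le (α := Int)).mpr h1
    push_cast at this
    nlinarith [this]
  · have := (Nat.cast_lt (α := Int)).mpr h2
    push_cast at this
    nlinarith [this]

theorem pv_cof (n c : Int) (hn : 0 < n) (hc : 1 ≤ c) (hdvd : c ∣ n) :
    1 ≤ n / c ∧ (n / c) ∣ n ∧ c * (n / c) = n := by
  have hmul : c * (n / c) = n := Int.mul_ediv_cancel' hdvd
  have hq : 1 ≤ n / c := by
    by_contra h
    push_neg at h
    have hle : c * (n / c) ≤ c * 0 := mul_le_mul_of_nonneg_left (by omega) (by omega)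
    simp only [mul_zero] at hle
    linarith
  exact ⟨hq, ⟨c, by rw [mul_comm]; exact hmul.symm⟩, hmul⟩

theorem pv_mem_foldl (n lo hi : Int) (l : List Int) (acc : PySem.Set Int) (x : Int) :
    x ∈ l.foldl (pvStep n lo hi) acc ↔
      x ∈ acc ∨ ∃ d ∈ l, PySem.Int.mod n d = 0 ∧
        ((x = d ∧ lo ≤ d ∧ d ≤ hi) ∨
         (x = PySem.Int.floordiv n d ∧ lo ≤ PySem.Int.floordiv n d ∧ PySem.Int.floordiv n d ≤ hi)) := by
  induction l generalizing acc with
  | nil => simp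
  | cons a t ih =>
    rw [List.foldl_cons, ih]
    have hstep : x ∈ pvStep n lo hi acc a ↔
        x ∈ acc ∨ (PySem.Int.mod n a = 0 ∧
          ((x = a ∧ lo ≤ a ∧ a ≤ hi) ∨
           (x = PySem.Int.floordiv n a ∧ lo ≤ PySem.Int.floordiv n a ∧ PySem.Int.floordiv n a ≤ hi))) := by
      simp only [pvStep]
      split_ifs <;> simp [PySem.Set.mem_add, *] <;> tauto
    rw [hstep]
    simp only [List.mem_cons]
    constructor
    · rintro (h | h)
      · rcases h with h | h
        · exact Or.inl h
        · exact Or.inr ⟨a, Or.inl rfl, h.1, h.2⟩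
      · rcases h with ⟨d, hd, hrest⟩
        exact Or.inr ⟨d, Or.inr hd, hrest⟩
    · rintro (h | ⟨d, (rfl | hd), hrest⟩)
      · exact Or.inl (Or.inl h)
      · exact Or.inl (Or.inr hrest)
      · exact Or.inr ⟨d, hd, hrest⟩

theorem pv_nodup_foldl (n lo hi : Int) (l : List Int) (acc : PySem.Set Int) (h : acc.Nodup) :
    (l.foldl (pvStep n lo hi) acc).Nodup := by
  induction l generalizing acc with
  | nil => exact h
  | cons a t ih =>
    refine ih _ ?_
    simp only [pvStep]
    split_ifs <;>
      first
        | exact h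
        | exact PySem.Set.nodup_add _ _ h
        | exact PySem.Set.nodup_add _ _ (PySem.Set.nodup_add _ _ h)

theorem pv_memA (n lo hi x : Int) (hn : 0 < n) :
    x ∈ (PySem.List.pyRange 1 (pvRoot n + 1)).foldl (pvStep n lo hi) PySem.Set.empty ↔ pvP n lo hi x := by
  obtain ⟨hr1, hr2⟩ := pv_root_facts n hn
  rw [pv_mem_foldl]
  constructor
  · rintro (h | ⟨d, hdmem, hmod, hcase⟩)
    · simp [PySem.Set.empty] at h
    · obtain ⟨hd1, hdlt⟩ := PySem.List.mem_pyRange_one.mp hdmem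
      have hdvd : d ∣ n := (PySem.Int.mod_eq_zero_iff_dvd n d).mp hmod
      have hdiv : PySem.Int.floordiv n d = n / d := PySem.Int.floordiv_eq_ediv_of_pos (by omega)
      rcases hcase with ⟨rfl, hlo, hhi⟩ | ⟨hx, hlo, hhi⟩
      · exact ⟨hdvd, hd1, hlo, hhi⟩
      · obtain ⟨hq1, hqdvd, _⟩ := pv_cof n d hn hd1 hdvd
        rw [hdiv] at hx hlo hhi
        exact hx ▸ ⟨hqdvd, hq1, hlo, hhi⟩
  · rintro ⟨hdvd, hx1, hlo, hhi⟩
    by_cases hxr : x ≤ pvRoot n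
    · refine Or.inr ⟨x, PySem.List.mem_pyRange_one.mpr ⟨hx1, by omega⟩,
        (PySem.Int.mod_eq_zero_iff_dvd n x).mpr hdvd, Or.inl ⟨rfl, hlo, hhi⟩⟩
    · push_neg at hxr
      obtain ⟨hc1, hcdvd, hmul⟩ := pv_cof n x hn hx1 hdvd
      have hcr : n / x ≤ pvRoot n := by
        by_contra hlt
        push_neg at hlt
        nlinarith
      obtain ⟨c, hc, hmul'⟩ : ∃ c, c = n / x ∧ c * x = n :=
        ⟨n / x, rfl, by rw [mul_comm]; exact hmul⟩
      have hncx : n / (n / x) = x := by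
        rw [← hc, ← hmul', Int.mul_ediv_cancel_left x (by omega)]
      have hdiv : PySem.Int.floordiv n (n / x) = n / (n / x) :=
        PySem.Int.floordiv_eq_ediv_of_pos (by omega)
      refine Or.inr ⟨n / x, PySem.List.mem_pyRange_one.mpr ⟨hc1, by omega⟩,
        (PySem.Int.mod_eq_zero_iff_dvd n (n / x)).mpr hcdvd, Or.inr ?_⟩
      rw [hdiv, hncx]
      exact ⟨rfl, hlo, hhi⟩

-- ---- B-side: arithmetic helpers ----

theorem pv_dvd_toNat (a b : Int) (ha : 0 ≤ a) (hb : 0 ≤ b) : a ∣ b ↔ a.toNat ∣ b.toNat := by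
  rw [← Int.natCast_dvd_natCast, Int.toNat_of_nonneg ha, Int.toNat_of_nonneg hb]

theorem pv_nat_unique_half (P D D' : ℕ) (K K' : ℕ) (hP : P.Prime) (hD : ¬ P ∣ D)
    (hle : K ≤ K') (h : D * P ^ K = D' * P ^ K') : D = D' ∧ K = K' := by
  obtain ⟨t, rfl⟩ := Nat.exists_eq_add_of_le hle
  rw [pow_add, ← mul_assoc, mul_right_comm] at h
  have hD2 : D = D' * P ^ t := Nat.eq_of_mul_eq_mul_right (pow_pos hP.pos K) h
  rcases Nat.eq_zero_or_pos t with rfl | ht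
  · exact ⟨by simpa using hD2, by omega⟩
  · refine absurd ?_ hD
    rw [hD2]
    exact (dvd_pow_self P ht.ne').mul_left D'

-- uniqueness of the p-adic part: d * p^k = d' * p^k' with p prime not dividing d, d' forces d = d', k = k' (ℕ)
theorem pv_nat_unique (P D D' : ℕ) (K K' : ℕ) (hP : P.Prime) (hD : ¬ P ∣ D) (hD' : ¬ P ∣ D')
    (h : D * P ^ K = D' * P ^ K') : D = D' ∧ K = K' := by
  rcases le_total K K' with hle | hle
  · exact pv_nat_unique_half P D D' K K' hP hD hle h
  · obtain ⟨h1, h2⟩ := pv_nat_unique_half P D' D K' K hP hD' hle h.symm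
    exact ⟨h1.symm, h2.symm⟩

-- decomposition of a divisor of c * p^j, p prime not dividing c (ℕ)
theorem pv_nat_decomp (C P : ℕ) (j X : ℕ) (hP : P.Prime) (hPC : ¬ P ∣ C) (hX : X ∣ C * P ^ j) :
    ∃ D, ∃ K ≤ j, D ∣ C ∧ X = D * P ^ K := by
  obtain ⟨a, b, ha, hb, rfl⟩ := exists_dvd_and_dvd_of_dvd_mul hX
  obtain ⟨K, hK, rfl⟩ := (Nat.dvd_prime_pow hP).mp hb
  exact ⟨a, K, hK, ha, rfl⟩

-- a number ≥ 2 with no divisor in [2, itself) is prime (stated on Int via toNat)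
theorem pv_prime_of_min (p : Int) (hp : 2 ≤ p) (h : ∀ k, 2 ≤ k → k < p → ¬ k ∣ p) :
    p.toNat.Prime := by
  have hpcast : ((p.toNat : Int)) = p := Int.toNat_of_nonneg (by omega)
  rw [Nat.prime_def_lt']
  refine ⟨by omega, fun k hk2 hklt hkdvd => ?_⟩
  refine h (k : Int) (by exact_mod_cast hk2) (by omega) ?_
  rw [← hpcast]
  exact_mod_cast hkdvd

theorem pvFactorOutGo_le (f : Nat) (p m e : Int) (hm : 0 ≤ m) :
    (pvFactorOutGo f p m e).1 ≤ m ∧ 0 ≤ (pvFactorOutGo f p m e).1 := by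
  induction f generalizing m e with
  | zero => exact ⟨le_refl m, hm⟩
  | succ f ihf =>
    rw [pvFactorOutGo]
    by_cases h : 2 ≤ p ∧ 0 < m ∧ PySem.Int.mod m p = 0
    · rw [if_pos h]
      obtain ⟨hp, hm0, hmod⟩ := h
      have he : PySem.Int.floordiv m p = m / p := PySem.Int.floordiv_eq_ediv_of_pos (by omega)
      have h0 : 0 ≤ m / p := Int.ediv_nonneg (by omega) (by omega)
      have h1 : m / p < m := by
        obtain ⟨k, rfl⟩ := (PySem.Int.mod_eq_zero_iff_dvd m p).mp hmod
        rw [Int.mul_ediv_cancel_left k (by omega)]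
        nlinarith
      have hrec := ihf (PySem.Int.floordiv m p) (e + 1) (by rw [he]; exact h0)
      refine ⟨hrec.1.trans ?_, hrec.2⟩
      rw [he]
      omega
    · rw [if_neg h]
      exact ⟨le_refl m, hm⟩

-- simple bound on pvFactorOut's result
theorem pvFactorOut_le (p m e : Int) (hm : 0 ≤ m) :
    (pvFactorOut p m e).1 ≤ m ∧ 0 ≤ (pvFactorOut p m e).1 :=
  pvFactorOutGo_le m.toNat p m e hm

-- pvFactorOut's full specification (enough fuel: m.toNat ≤ f)
theorem pvFactorOutGo_spec (f : Nat) (p m e : Int) (hp : 2 ≤ p) (hm : 0 < m)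
    (hf : m.toNat ≤ f) :
    ∃ j : ℕ, (pvFactorOutGo f p m e).2 = e + j ∧ m = (pvFactorOutGo f p m e).1 * p ^ j ∧
      0 < (pvFactorOutGo f p m e).1 ∧ ¬ p ∣ (pvFactorOutGo f p m e).1 := by
  induction f generalizing m e with
  | zero => exact absurd hf (by omega)
  | succ f ihf =>
    rw [pvFactorOutGo]
    by_cases h : 2 ≤ p ∧ 0 < m ∧ PySem.Int.mod m p = 0
    · rw [if_pos h]
      have hdvd : p ∣ m := (PySem.Int.mod_eq_zero_iff_dvd m p).mp h.2.2
      have he : PySem.Int.floordiv m p = m / p := PySem.Int.floordiv_eq_ediv_of_pos (by omega)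
      obtain ⟨k, rfl⟩ := hdvd
      have hk : 0 < k := by nlinarith
      have hdk : p * k / p = k := Int.mul_ediv_cancel_left k (by omega)
      have hlt : k < p * k := by nlinarith
      have hrec := ihf (PySem.Int.floordiv (p * k) p) (e + 1) (by rw [he, hdk]; exact hk)
        (by rw [he, hdk]; omega)
      rw [he, hdk] at hrec ⊢
      obtain ⟨j, h1, h2, h3, h4⟩ := hrec
      refine ⟨j + 1, ?_, ?_, h3, h4⟩
      · rw [h1]
        push_cast
        ring
      · rw [mul_comm p k]
        nth_rewrite 1 [h2]
        ring
    · rw [if_neg h]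
      have hnd : ¬ p ∣ m := fun hh => h ⟨hp, hm, (PySem.Int.mod_eq_zero_iff_dvd m p).mpr hh⟩
      exact ⟨0, by simp, by simp, hm, hnd⟩

theorem pvFactorOut_spec (p m e : Int) (hp : 2 ≤ p) (hm : 0 < m) :
    ∃ j : ℕ, (pvFactorOut p m e).2 = e + j ∧ m = (pvFactorOut p m e).1 * p ^ j ∧
      0 < (pvFactorOut p m e).1 ∧ ¬ p ∣ (pvFactorOut p m e).1 :=
  pvFactorOutGo_spec m.toNat p m e hp hm (le_refl _)

-- pow is injective in the exponent for base > 1 (Int)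
theorem pv_pow_inj (p : Int) (hp : 1 < p) (a b : ℕ) (h : p ^ a = p ^ b) : a = b := by
  rcases lt_trichotomy a b with h' | h' | h'
  · exact absurd h (ne_of_lt (pow_lt_pow_right₀ hp h'))
  · exact h'
  · exact absurd h.symm (ne_of_lt (pow_lt_pow_right₀ hp h'))

-- transfer of pv_nat_unique to positive integers
theorem pv_int_unique (p d d' : Int) (K K' : ℕ) (hp2 : 2 ≤ p) (hprime : p.toNat.Prime)
    (hd : 0 < d) (hd' : 0 < d') (hpd : ¬ p ∣ d) (hpd' : ¬ p ∣ d')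
    (h : d * p ^ K = d' * p ^ K') : d = d' ∧ K = K' := by
  have hN : d.toNat * p.toNat ^ K = d'.toNat * p.toNat ^ K' := by
    have hcast : ((d.toNat * p.toNat ^ K : ℕ) : Int) = ((d'.toNat * p.toNat ^ K' : ℕ) : Int) := by
      push_cast
      rw [Int.toNat_of_nonneg hd.le, Int.toNat_of_nonneg hd'.le, Int.toNat_of_nonneg (by omega : (0:Int) ≤ p)]
      exact h
    exact_mod_cast hcast
  have h1 : ¬ p.toNat ∣ d.toNat := fun hh => hpd ((pv_dvd_toNat p d (by omega) hd.le).mpr hh)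
  have h2 : ¬ p.toNat ∣ d'.toNat := fun hh => hpd' ((pv_dvd_toNat p d' (by omega) hd'.le).mpr hh)
  obtain ⟨hdd, hkk⟩ := pv_nat_unique p.toNat d.toNat d'.toNat K K' hprime h1 h2 hN
  exact ⟨by omega, hkk⟩

-- transfer of divisibility of c * p^j to ℕ
theorem pv_dvd_prod_toNat (c p x : Int) (j : ℕ) (hc : 0 < c) (hp : 0 < p) (hx : 0 < x)
    (h : x ∣ c * p ^ j) : x.toNat ∣ c.toNat * p.toNat ^ j := by
  rw [← Int.natCast_dvd_natCast]
  push_cast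
  rw [Int.toNat_of_nonneg hc.le, Int.toNat_of_nonneg hp.le, Int.toNat_of_nonneg hx.le]
  exact h

-- pyRange is strictly increasing
theorem pv_range_pairwise (a b : Int) : (PySem.List.pyRange a b).Pairwise (· < ·) := by
  rw [PySem.List.pyRange_of_pos a b one_pos]
  refine List.pairwise_map.mpr ?_
  refine List.pairwise_lt_range.imp ?_
  intro k l h
  omega

-- one factoring step of the divisor list: membership and nodup
theorem pv_step_mem (c p : Int) (j : ℕ) (divs : List Int)
    (hc : 0 < c) (hp2 : 2 ≤ p) (hprime : p.toNat.Prime) (hpc : ¬ p ∣ c)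
    (hmem : ∀ x, x ∈ divs ↔ (x ∣ c ∧ 0 < x)) (hnd : divs.Nodup) :
    (∀ x, x ∈ divs.flatMap (fun d => (PySem.List.pyRange 0 ((j : Int) + 1)).map (fun k => d * p ^ k.toNat))
        ↔ (x ∣ c * p ^ j ∧ 0 < x)) ∧
      (divs.flatMap (fun d => (PySem.List.pyRange 0 ((j : Int) + 1)).map (fun k => d * p ^ k.toNat))).Nodup := by
  have hp1 : (1:Int) < p := by omega
  have hp0 : (0:Int) < p := by omega
  have hPCn : ¬ p.toNat ∣ c.toNat := fun hh => hpc ((pv_dvd_toNat p c (by omega) hc.le).mpr hh)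
  have hdivp : ∀ d ∈ divs, ¬ p ∣ d := by
    intro d hdm hh
    exact hpc (hh.trans ((hmem d).mp hdm).1)
  constructor
  · intro x
    rw [List.mem_flatMap]
    constructor
    · rintro ⟨d, hdmem, hx⟩
      rw [List.mem_map] at hx
      obtain ⟨k, hk, rfl⟩ := hx
      obtain ⟨hd_dvd, hd_pos⟩ := (hmem d).mp hdmem
      obtain ⟨hk0, hkj⟩ := PySem.List.mem_pyRange_one.mp hk
      have hkle : k.toNat ≤ j := by omega
      exact ⟨mul_dvd_mul hd_dvd (pow_dvd_pow p hkle), by positivity⟩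
    · rintro ⟨hdvd, hxpos⟩
      have hdvdN := pv_dvd_prod_toNat c p x j hc hp0 hxpos hdvd
      obtain ⟨D, K, hK, hDdvd, hXeq⟩ := pv_nat_decomp c.toNat p.toNat j x.toNat hprime hPCn hdvdN
      have hD0 : D ≠ 0 := by
        rintro rfl
        rw [zero_mul] at hXeq
        omega
      have hxD : x = (D : Int) * p ^ K := by
        have h0 : ((x.toNat : Int)) = ((D * p.toNat ^ K : ℕ) : Int) := by exact_mod_cast hXeq
        rw [Int.toNat_of_nonneg hxpos.le] at h0
        rw [h0]
        push_cast
        rw [Int.toNat_of_nonneg hp0.le]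
      refine ⟨(D : Int), (hmem _).mpr ⟨?_, by positivity⟩, ?_⟩
      · have hD2 : ((D : Int)) ∣ ((c.toNat : Int)) := Int.natCast_dvd_natCast.mpr hDdvd
        rwa [Int.toNat_of_nonneg hc.le] at hD2
      · rw [List.mem_map]
        refine ⟨(K : Int), PySem.List.mem_pyRange_one.mpr ⟨by positivity, by omega⟩, ?_⟩
        rw [Int.toNat_natCast]
        exact hxD.symm
  · rw [List.nodup_flatMap]
    constructor
    · intro d hdmem
      obtain ⟨hd_dvd, hd_pos⟩ := (hmem d).mp hdmem
      refine List.Nodup.map_on ?_ ((pv_range_pairwise _ _).imp ne_of_lt)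
      intro k hk k' hk' heq
      obtain ⟨hk0, _⟩ := PySem.List.mem_pyRange_one.mp hk
      obtain ⟨hk0', _⟩ := PySem.List.mem_pyRange_one.mp hk'
      have hpe : p ^ k.toNat = p ^ k'.toNat := mul_left_cancel₀ (ne_of_gt hd_pos) heq
      have := pv_pow_inj p hp1 k.toNat k'.toNat hpe
      omega
    · refine hnd.imp_of_mem ?_
      intro a b ha hb hne x hxa hxb
      obtain ⟨k, hk, rfl⟩ := List.mem_map.mp hxa
      obtain ⟨k', hk', heq⟩ := List.mem_map.mp hxb
      obtain ⟨ha_dvd, ha_pos⟩ := (hmem a).mp ha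
      obtain ⟨hb_dvd, hb_pos⟩ := (hmem b).mp hb
      exact hne (pv_int_unique p a b k.toNat k'.toNat hp2 hprime ha_pos hb_pos
        (hdivp a ha) (hdivp b hb) heq.symm).1

-- the final residual step (m prime, m not dividing c): membership and nodup
theorem pv_final_mem (c m : Int) (divs : List Int)
    (hc : 0 < c) (hm : 1 < m) (hprime : m.toNat.Prime) (hmc : ¬ m ∣ c)
    (hmem : ∀ x, x ∈ divs ↔ (x ∣ c ∧ 0 < x)) (hnd : divs.Nodup) :
    (∀ x, x ∈ divs.flatMap (fun d => [1, m].map (fun q => d * q)) ↔ (x ∣ c * m ∧ 0 < x)) ∧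
      (divs.flatMap (fun d => [1, m].map (fun q => d * q))).Nodup := by
  have hm0 : (0:Int) < m := by omega
  have hMCn : ¬ m.toNat ∣ c.toNat := fun hh => hmc ((pv_dvd_toNat m c (by omega) hc.le).mpr hh)
  have hdivm : ∀ d ∈ divs, ¬ m ∣ d := by
    intro d hdm hh
    exact hmc (hh.trans ((hmem d).mp hdm).1)
  have hpowform : ∀ d q : Int, q ∈ ([1, m] : List Int) → ∃ K ≤ 1, d * q = d * m ^ K := by
    intro d q hq
    rcases List.mem_cons.mp hq with rfl | hq'
    · exact ⟨0, by omega, by ring⟩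
    · rw [List.mem_singleton] at hq'
      subst hq'
      exact ⟨1, le_refl 1, by ring⟩
  constructor
  · intro x
    rw [List.mem_flatMap]
    constructor
    · rintro ⟨d, hdmem, hx⟩
      rw [List.mem_map] at hx
      obtain ⟨q, hq, rfl⟩ := hx
      obtain ⟨hd_dvd, hd_pos⟩ := (hmem d).mp hdmem
      rcases List.mem_cons.mp hq with rfl | hq'
      · exact ⟨by simpa using hd_dvd.mul_right m, by omega⟩
      · rw [List.mem_singleton] at hq'
        subst hq'
        exact ⟨mul_dvd_mul hd_dvd dvd_rfl, by positivity⟩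
    · rintro ⟨hdvd, hxpos⟩
      have hdvdN := pv_dvd_prod_toNat c m x 1 hc hm0 hxpos (by rw [pow_one]; exact hdvd)
      obtain ⟨D, K, hK, hDdvd, hXeq⟩ := pv_nat_decomp c.toNat m.toNat 1 x.toNat hprime hMCn hdvdN
      have hD0 : D ≠ 0 := by
        rintro rfl
        rw [zero_mul] at hXeq
        omega
      have hxD : x = (D : Int) * m ^ K := by
        have h0 : ((x.toNat : Int)) = ((D * m.toNat ^ K : ℕ) : Int) := by exact_mod_cast hXeq
        rw [Int.toNat_of_nonneg hxpos.le] at h0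
        rw [h0]
        push_cast
        rw [Int.toNat_of_nonneg hm0.le]
      have hDdvdInt : ((D : Int)) ∣ c := by
        have hD2 : ((D : Int)) ∣ ((c.toNat : Int)) := Int.natCast_dvd_natCast.mpr hDdvd
        rwa [Int.toNat_of_nonneg hc.le] at hD2
      refine ⟨(D : Int), (hmem _).mpr ⟨hDdvdInt, by positivity⟩, ?_⟩
      rw [List.mem_map]
      interval_cases K
      · exact ⟨1, by simp, by rw [hxD]; ring⟩
      · exact ⟨m, by simp, by rw [hxD]; ring⟩
  · rw [List.nodup_flatMap]
    constructor
    · intro d hdmem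
      obtain ⟨hd_dvd, hd_pos⟩ := (hmem d).mp hdmem
      simp only [List.map_cons, List.map_nil]
      refine List.nodup_cons.mpr ⟨?_, List.nodup_singleton _⟩
      simp only [List.mem_singleton]
      intro hh
      nlinarith
    · refine hnd.imp_of_mem ?_
      intro a b ha hb hne x hxa hxb
      obtain ⟨q, hq, rfl⟩ := List.mem_map.mp hxa
      obtain ⟨q', hq', heq⟩ := List.mem_map.mp hxb
      obtain ⟨ha_dvd, ha_pos⟩ := (hmem a).mp ha
      obtain ⟨hb_dvd, hb_pos⟩ := (hmem b).mp hb
      obtain ⟨K, hK, hKe⟩ := hpowform a q hq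
      obtain ⟨K', hK', hKe'⟩ := hpowform b q' hq'
      rw [hKe] at heq
      rw [hKe'] at heq
      exact hne (pv_int_unique m a b K K' (by omega) hprime ha_pos hb_pos
        (hdivm a ha) (hdivm b hb) heq.symm).1

-- the main loop invariant, by induction on the fuel (enough fuel: (m-p).toNat < f)
theorem pvLoopGo_spec (f : Nat) (p m : Int) (divs : List Int) (c : Int)
    (hf : (m - p).toNat < f) (hp : 2 ≤ p) (hm : 0 < m) (hc : 0 < c)
    (hmem : ∀ x, x ∈ divs ↔ (x ∣ c ∧ 0 < x)) (hnd : divs.Nodup)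
    (hsmall : ∀ k, 2 ≤ k → k < p → ¬ k ∣ m)
    (hcp : ∀ q : Int, 2 ≤ q → q ∣ c → q.toNat.Prime → q < p) :
    ∃ c' : Int, 0 < c' ∧ m * c = (pvLoopGo f p m divs).1 * c' ∧
      (∀ x, x ∈ (pvLoopGo f p m divs).2 ↔ (x ∣ c' ∧ 0 < x)) ∧ (pvLoopGo f p m divs).2.Nodup ∧
      0 < (pvLoopGo f p m divs).1 ∧
      ((pvLoopGo f p m divs).1 = 1 ∨
        (1 < (pvLoopGo f p m divs).1 ∧ (pvLoopGo f p m divs).1.toNat.Prime ∧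
          ¬ (pvLoopGo f p m divs).1 ∣ c')) := by
  induction f generalizing p m divs c with
  | zero => exact absurd hf (by omega)
  | succ f ihf =>
    rw [pvLoopGo]
    by_cases hg : p * p ≤ m ∧ 2 ≤ p
    · have hpm : p < m := by nlinarith [hg.1, hg.2]
      rw [if_pos hg]
      by_cases hmod : PySem.Int.mod m p = 0
      · rw [if_pos hmod]
        dsimp only
        have hpdvdm : p ∣ m := (PySem.Int.mod_eq_zero_iff_dvd m p).mp hmod
        have hprime : p.toNat.Prime :=
          pv_prime_of_min p hg.2 (fun k h2 hlt hkdvd => hsmall k h2 hlt (hkdvd.trans hpdvdm))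
        have hpc : ¬ p ∣ c := fun hh => absurd (hcp p hg.2 hh hprime) (lt_irrefl p)
        obtain ⟨j, hj2, hjm, hjpos, hjnd⟩ := pvFactorOut_spec p m 0 hg.2 hm
        have hexp : (pvFactorOut p m 0).2 + 1 = (j : Int) + 1 := by rw [hj2]; ring
        obtain ⟨hmem', hnd'⟩ := pv_step_mem c p j divs hc hg.2 hprime hpc hmem hnd
        rw [← hexp] at hmem' hnd'
        have hm1dvdm : (pvFactorOut p m 0).1 ∣ m := ⟨p ^ j, hjm⟩
        have hm1le := pvFactorOut_le p m 0 (by omega)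
        have hsmall' : ∀ k, 2 ≤ k → k < p + 1 → ¬ k ∣ (pvFactorOut p m 0).1 := by
          intro k h2 hlt hkdvd
          by_cases hkp : k < p
          · exact hsmall k h2 hkp (hkdvd.trans hm1dvdm)
          · have hk : k = p := by omega
            subst hk
            exact hjnd hkdvd
        have hcp' : ∀ q : Int, 2 ≤ q → q ∣ c * p ^ j → q.toNat.Prime → q < p + 1 := by
          intro q h2 hqdvd hq
          have hqd : q.toNat ∣ c.toNat * p.toNat ^ j :=
            pv_dvd_prod_toNat c p q j hc (by omega) (by omega) hqdvd
          rcases (Nat.Prime.dvd_mul hq).mp hqd with hcase | hcase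
          · have hqc : q ∣ c := (pv_dvd_toNat q c (by omega) hc.le).mpr hcase
            have := hcp q h2 hqc hq
            omega
          · have hqp : q.toNat = p.toNat :=
              (Nat.prime_dvd_prime_iff_eq hq hprime).mp (hq.dvd_of_dvd_pow hcase)
            omega
        obtain ⟨c'', hc''pos, heq, hmem'', hnd'', hpos'', hdisj''⟩ :=
          ihf (p + 1) (pvFactorOut p m 0).1
            (divs.flatMap (fun d =>
              (PySem.List.pyRange 0 ((pvFactorOut p m 0).2 + 1)).map (fun k => d * p ^ k.toNat)))
            (c * p ^ j) (by omega) (by omega) hjpos (by positivity) hmem' hnd' hsmall' hcp'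
        refine ⟨c'', hc''pos, ?_, hmem'', hnd'', hpos'', hdisj''⟩
        exact (by nth_rewrite 1 [hjm]; ring :
          m * c = (pvFactorOut p m 0).1 * (c * p ^ j)).trans heq
      · rw [if_neg hmod]
        have hnp : ¬ p ∣ m := fun hh => hmod ((PySem.Int.mod_eq_zero_iff_dvd m p).mpr hh)
        have hsmall' : ∀ k, 2 ≤ k → k < p + 1 → ¬ k ∣ m := by
          intro k h2 hlt hkdvd
          by_cases hkp : k < p
          · exact hsmall k h2 hkp hkdvd
          · have hk : k = p := by omega
            subst hk
            exact hnp hkdvd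
        exact ihf (p + 1) m divs c (by omega) (by omega) hm hc hmem hnd hsmall'
          (fun q h2 hqd hq => (hcp q h2 hqd hq).trans (lt_add_one p))
    · rw [if_neg hg]
      have hmpp : m < p * p := by
        by_contra hh
        push_neg at hh
        exact hg ⟨hh, hp⟩
      refine ⟨c, hc, rfl, hmem, hnd, hm, ?_⟩
      rcases eq_or_lt_of_le (by omega : (1:Int) ≤ m) with h1 | h1
      · exact Or.inl h1.symm
      · right
        have hmin : ∀ k, 2 ≤ k → k < m → ¬ k ∣ m := by
          intro k h2 hlt hkdvd
          by_cases hkp : k < p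
          · exact hsmall k h2 hkp hkdvd
          · obtain ⟨b, hb⟩ := hkdvd
            have hb1 : 1 ≤ b := by nlinarith
            have hb2 : b ≠ 1 := by
              rintro rfl
              omega
            have hbp : b < p := by nlinarith
            exact hsmall b (by omega) hbp ⟨k, by rw [hb]; ring⟩
        have hprime : m.toNat.Prime := pv_prime_of_min m (by omega) hmin
        refine ⟨h1, hprime, fun hmdvd => ?_⟩
        have hmp : m < p := hcp m (by omega) hmdvd hprime
        exact hsmall m (by omega) hmp dvd_rfl

theorem pvLoop_spec (p m : Int) (divs : List Int) (c : Int)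
    (hp : 2 ≤ p) (hm : 0 < m) (hc : 0 < c)
    (hmem : ∀ x, x ∈ divs ↔ (x ∣ c ∧ 0 < x)) (hnd : divs.Nodup)
    (hsmall : ∀ k, 2 ≤ k → k < p → ¬ k ∣ m)
    (hcp : ∀ q : Int, 2 ≤ q → q ∣ c → q.toNat.Prime → q < p) :
    ∃ c' : Int, 0 < c' ∧ m * c = (pvLoop p m divs).1 * c' ∧
      (∀ x, x ∈ (pvLoop p m divs).2 ↔ (x ∣ c' ∧ 0 < x)) ∧ (pvLoop p m divs).2.Nodup ∧
      0 < (pvLoop p m divs).1 ∧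
      ((pvLoop p m divs).1 = 1 ∨
        (1 < (pvLoop p m divs).1 ∧ (pvLoop p m divs).1.toNat.Prime ∧ ¬ (pvLoop p m divs).1 ∣ c')) :=
  pvLoopGo_spec ((m - p).toNat + 1) p m divs c (by omega) hp hm hc hmem hnd hsmall hcp

-- B's pre-sort list: membership = pvP, and nodup
theorem pv_B_list (n lo hi : Int) (hn : 0 < n) :
    (∀ x, x ∈ ((if 1 < (pvLoop 2 n [1]).1 then
          (pvLoop 2 n [1]).2.flatMap (fun d => [1, (pvLoop 2 n [1]).1].map (fun q => d * q))
        else (pvLoop 2 n [1]).2).filter (fun d => decide (lo ≤ d ∧ d ≤ hi))) ↔ pvP n lo hi x) ∧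
      ((if 1 < (pvLoop 2 n [1]).1 then
          (pvLoop 2 n [1]).2.flatMap (fun d => [1, (pvLoop 2 n [1]).1].map (fun q => d * q))
        else (pvLoop 2 n [1]).2).filter (fun d => decide (lo ≤ d ∧ d ≤ hi))).Nodup := by
  have hmem1 : ∀ x : Int, x ∈ ([1] : List Int) ↔ (x ∣ 1 ∧ 0 < x) := by
    intro x
    simp only [List.mem_singleton]
    constructor
    · rintro rfl
      exact ⟨dvd_rfl, one_pos⟩
    · rintro ⟨hdvd, hpos⟩
      rcases Int.isUnit_iff.mp (isUnit_of_dvd_one hdvd) with rfl | rfl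
      · rfl
      · omega
  obtain ⟨c', hc'pos, heq, hmem, hnd, hr1pos, hdisj⟩ :=
    pvLoop_spec 2 n [1] 1 (le_refl 2) hn one_pos hmem1 (List.nodup_singleton 1)
      (fun k h2 hlt => absurd h2 (by omega)) (fun q h2 hqd _ => by
        rcases Int.isUnit_iff.mp (isUnit_of_dvd_one hqd) with rfl | rfl <;> omega)
  rw [mul_one] at heq
  have hall : ∀ x, x ∈ (if 1 < (pvLoop 2 n [1]).1 then
        (pvLoop 2 n [1]).2.flatMap (fun d => [1, (pvLoop 2 n [1]).1].map (fun q => d * q))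
      else (pvLoop 2 n [1]).2) ↔ (x ∣ n ∧ 0 < x) := by
    rcases hdisj with h1 | ⟨h1, hpr, hnotdvd⟩
    · rw [if_neg (by omega)]
      intro x
      rw [hmem x]
      rw [h1, one_mul] at heq
      rw [← heq]
    · rw [if_pos h1]
      intro x
      obtain ⟨hm2, _⟩ := pv_final_mem c' (pvLoop 2 n [1]).1 (pvLoop 2 n [1]).2
        hc'pos h1 hpr hnotdvd hmem hnd
      rw [hm2 x, mul_comm c' (pvLoop 2 n [1]).1, ← heq]
  have hndF : (if 1 < (pvLoop 2 n [1]).1 then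
        (pvLoop 2 n [1]).2.flatMap (fun d => [1, (pvLoop 2 n [1]).1].map (fun q => d * q))
      else (pvLoop 2 n [1]).2).Nodup := by
    rcases hdisj with h1 | ⟨h1, hpr, hnotdvd⟩
    · rw [if_neg (by omega)]
      exact hnd
    · rw [if_pos h1]
      exact (pv_final_mem c' (pvLoop 2 n [1]).1 (pvLoop 2 n [1]).2
        hc'pos h1 hpr hnotdvd hmem hnd).2
  refine ⟨fun x => ?_, hndF.filter _⟩
  rw [List.mem_filter, hall x]
  simp only [decide_eq_true_eq, pvP]
  constructor
  · rintro ⟨⟨hdvd, hpos⟩, hlo, hhi⟩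
    exact ⟨hdvd, by omega, hlo, hhi⟩
  · rintro ⟨hdvd, h1, hlo, hhi⟩
    exact ⟨⟨hdvd, by omega⟩, hlo, hhi⟩

-- ===== VERDICT (by name: the statement is the Claim_ definition above) =====
theorem divisors_in_range_py_spec : Claim_equal_divisors_in_range_py := by
  intro n? lo hi _dom
  unfold Spec_divisors_in_range_py divisors_in_range_py divisors_in_range_py_alt
  match n? with
  | none => rfl
  | some n =>
    by_cases hn : n ≤ 0
    · simp [hn]
    · push_neg at hn
      simp only [if_neg (not_le.mpr hn)]
      obtain ⟨hmemB, hndB⟩ := pv_B_list n lo hi hn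
      exact PySem.List.sorted_eq_sorted_of_perm _ _ _ (fun a b h => h)
        ((List.perm_ext_iff_of_nodup
            (pv_nodup_foldl n lo hi (PySem.List.pyRange 1 (pvRoot n + 1)) PySem.Set.empty
              (by simp [PySem.Set.empty]))
            hndB).mpr
          (fun x => (pv_memA n lo hi x hn).trans (hmemB x).symm))
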